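-- pv_equiv track=rewrite | github.com/Abhiram2144/FytMe | backend/app/fashion_knowledge.py | validate_formality_match
-- ===== SOURCE A (Python) =====
-- TOP_CATEGORIES = ["shirt", "t-shirt", "polo", "hoodie", "sweater", "jacket"]
--
-- BOTTOM_CATEGORIES = ["trousers", "jeans", "joggers", "shorts"]
--
-- SHOE_CATEGORIES = ["shoes"]
--
-- FORMALITY_RULES = {
--     "formal": {
--         "allowed_tops": ["shirt"],  # Only dress shirts
--         "allowed_bottoms": ["trousers"],  # Only dress pants
--         "allowed_shoes": ["shoes"],  # Assuming dress shoes
--         "avoid_patterns": ["graphic"],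
--         "reasoning": "Formal contexts require traditional business attire"
--     },
--
--     "smart_casual": {
--         "allowed_tops": ["shirt", "polo", "sweater"],
--         "allowed_bottoms": ["trousers", "jeans"],
--         "allowed_shoes": ["shoes"],
--         "avoid_patterns": ["graphic"],
--         "reasoning": "Business casual allows more flexibility but still polished"
--     },
--
--     "casual": {
--         "allowed_tops": ["shirt", "t-shirt", "polo", "hoodie", "sweater"],
--         "allowed_bottoms": ["trousers", "jeans", "joggers", "shorts"],
--         "allowed_shoes": ["shoes"],
--         "avoid_patterns": [],
--         "reasoning": "Casual allows all categories"
--     }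
-- }
--
-- def get_category_type(category: str) -> str:
--     """
--     Returns whether a category is a 'top', 'bottom', 'shoes', or 'other'.
--     """
--     if category in TOP_CATEGORIES:
--         return "top"
--     elif category in BOTTOM_CATEGORIES:
--         return "bottom"
--     elif category in SHOE_CATEGORIES:
--         return "shoes"
--     else:
--         return "other"
--
-- def validate_formality_match(items: list, target_formality: str = None) -> bool:
--     """
--     Checks if all items in an outfit match the target formality level.
--     If no target is specified, checks if items are compatible with each other.
--     """
--     if not target_formality:
--         # Infer from items' styles (would need item style distributions)
--         return True
--
--     if target_formality not in FORMALITY_RULES: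
--         return True
--
--     rules = FORMALITY_RULES[target_formality]
--
--     for item in items:
--         category = item.get("category", "")
--         cat_type = get_category_type(category)
--
--         if cat_type == "top" and category not in rules["allowed_tops"]:
--             return False
--         elif cat_type == "bottom" and category not in rules["allowed_bottoms"]:
--             return False
--         elif cat_type == "shoes" and category not in rules["allowed_shoes"]:
--             return False
--
--     return True
-- ===== SOURCE B (Python) =====
-- TOP_CATEGORIES = ["shirt", "t-shirt", "polo", "hoodie", "sweater", "jacket"]
-- BOTTOM_CATEGORIES = ["trousers", "jeans", "joggers", "shorts"]
-- SHOE_CATEGORIES = ["shoes"]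
--
-- FORMALITY_RULES = {
--     "formal": {
--         "allowed_tops": ["shirt"],
--         "allowed_bottoms": ["trousers"],
--         "allowed_shoes": ["shoes"],
--         "avoid_patterns": ["graphic"],
--         "reasoning": "Formal contexts require traditional business attire"
--     },
--     "smart_casual": {
--         "allowed_tops": ["shirt", "polo", "sweater"],
--         "allowed_bottoms": ["trousers", "jeans"],
--         "allowed_shoes": ["shoes"],
--         "avoid_patterns": ["graphic"],
--         "reasoning": "Business casual allows more flexibility but still polished"
--     },
--     "casual": {
--         "allowed_tops": ["shirt", "t-shirt", "polo", "hoodie", "sweater"],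
--         "allowed_bottoms": ["trousers", "jeans", "joggers", "shorts"],
--         "allowed_shoes": ["shoes"],
--         "avoid_patterns": [],
--         "reasoning": "Casual allows all categories"
--     }
-- }
--
-- # One forbidden-category set per formality level, precomputed once from the
-- # category lists minus the corresponding allowed lists.
-- FORBIDDEN = {
--     level: {
--         c
--         for cats, key in ((TOP_CATEGORIES, "allowed_tops"),
--                           (BOTTOM_CATEGORIES, "allowed_bottoms"),
--                           (SHOE_CATEGORIES, "allowed_shoes"))
--         for c in cats
--         if c not in rules[key]
--     }
--     for level, rules in FORMALITY_RULES.items()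
-- }
--
--
-- def validate_formality_match(items: list, target_formality: str = None) -> bool:
--     if not target_formality or target_formality not in FORBIDDEN:
--         return True
--     forbidden = FORBIDDEN[target_formality]
--     return all(item.get("category", "") not in forbidden for item in items)
-- ===== Notes on version B (the rewrite author's own statement) =====
-- stated objective: simpler
-- what changed: B precomputes one forbidden-category set per formality level (category lists minus the allowed lists) and replaces A's per-item get_category_type dispatch plus three-way branch by a single flat membership test over the items.
import Mathlib
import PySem

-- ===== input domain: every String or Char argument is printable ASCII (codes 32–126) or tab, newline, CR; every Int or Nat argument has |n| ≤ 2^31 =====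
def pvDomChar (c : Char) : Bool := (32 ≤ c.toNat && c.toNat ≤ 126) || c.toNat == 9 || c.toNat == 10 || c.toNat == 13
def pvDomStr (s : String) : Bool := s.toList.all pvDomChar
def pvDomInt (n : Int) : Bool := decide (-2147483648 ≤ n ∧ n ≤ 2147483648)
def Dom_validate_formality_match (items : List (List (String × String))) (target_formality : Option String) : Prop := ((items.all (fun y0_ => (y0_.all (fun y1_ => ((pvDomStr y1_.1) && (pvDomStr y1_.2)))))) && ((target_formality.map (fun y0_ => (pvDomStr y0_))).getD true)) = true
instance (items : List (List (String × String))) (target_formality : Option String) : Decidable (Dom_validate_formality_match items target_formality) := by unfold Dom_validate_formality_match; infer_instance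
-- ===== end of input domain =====

-- B replaces the per-item three-way branch of A by a single precomputed forbidden-category
-- set per formality level and one flat membership pass (objective: simpler).

-- ===== PORT A =====
def TOP_CATEGORIES : List String := ["shirt", "t-shirt", "polo", "hoodie", "sweater", "jacket"]
def BOTTOM_CATEGORIES : List String := ["trousers", "jeans", "joggers", "shorts"]
def SHOE_CATEGORIES : List String := ["shoes"]

structure FormalityRule where
  allowed_tops : List String
  allowed_bottoms : List String
  allowed_shoes : List String
  avoid_patterns : List String
  reasoning : String
deriving Repr, DecidableEq

def FORMALITY_RULES : PySem.Dict String FormalityRule :=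
  PySem.Dict.ofList [
    ("formal", ⟨["shirt"], ["trousers"], ["shoes"], ["graphic"],
      "Formal contexts require traditional business attire"⟩),
    ("smart_casual", ⟨["shirt", "polo", "sweater"], ["trousers", "jeans"], ["shoes"], ["graphic"],
      "Business casual allows more flexibility but still polished"⟩),
    ("casual", ⟨["shirt", "t-shirt", "polo", "hoodie", "sweater"],
      ["trousers", "jeans", "joggers", "shorts"], ["shoes"], [],
      "Casual allows all categories"⟩)]

def get_category_type (category : String) : String :=
  if TOP_CATEGORIES.contains category then "top"
  else if BOTTOM_CATEGORIES.contains category then "bottom"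
  else if SHOE_CATEGORIES.contains category then "shoes"
  else "other"

-- the for-loop of A, item by item (early return False = stop with false)
def validateLoopA (rules : FormalityRule) : List (List (String × String)) → Bool
  | [] => true
  | item :: rest =>
    let category := (PySem.Dict.mk item).getD "category" ""
    let cat_type := get_category_type category
    if cat_type == "top" && !(rules.allowed_tops.contains category) then false
    else if cat_type == "bottom" && !(rules.allowed_bottoms.contains category) then false
    else if cat_type == "shoes" && !(rules.allowed_shoes.contains category) then false
    else validateLoopA rules rest

def validate_formality_match (items : List (List (String × String))) (target_formality : Option String) : Bool :=
  match target_formality with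
  | none => true          -- 'if not target_formality': None is falsy
  | some tf =>
    if tf == "" then true -- '' is falsy too
    else
      match FORMALITY_RULES.get? tf with
      | none => true      -- 'target_formality not in FORMALITY_RULES'
      | some rules => validateLoopA rules items

-- ===== PORT B =====
-- FORBIDDEN = {level: {c for cats,key in … for c in cats if c not in rules[key]} for level, rules in FORMALITY_RULES.items()}
def FORBIDDEN : PySem.Dict String (PySem.Set String) :=
  PySem.Dict.ofList (FORMALITY_RULES.items.map (fun lr =>
    (lr.1, PySem.Set.ofList (
      (TOP_CATEGORIES.filter (fun c => !(lr.2.allowed_tops.contains c))) ++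
      (BOTTOM_CATEGORIES.filter (fun c => !(lr.2.allowed_bottoms.contains c))) ++
      (SHOE_CATEGORIES.filter (fun c => !(lr.2.allowed_shoes.contains c)))))))

def validate_formality_match_alt (items : List (List (String × String))) (target_formality : Option String) : Bool :=
  match target_formality with
  | none => true
  | some tf =>
    if tf == "" || !(FORBIDDEN.contains tf) then true
    else
      let forbidden := FORBIDDEN.getD tf []
      items.all (fun item => !(PySem.Set.contains forbidden ((PySem.Dict.mk item).getD "category" "")))

-- ===== PRECONDITION & SPEC =====
def Spec_validate_formality_match (items : List (List (String × String))) (target_formality : Option String) (out : Bool) : Prop := out = validate_formality_match_alt items target_formality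
instance (items : List (List (String × String))) (target_formality : Option String) (out : Bool) : Decidable (Spec_validate_formality_match items target_formality out) := by unfold Spec_validate_formality_match; infer_instance

-- ===== CLAIM (what is proved, stated in full; the proofs are below) =====
def Claim_equal_validate_formality_match : Prop := ∀ (items : List (List (String × String))) (target_formality : Option String), Dom_validate_formality_match items target_formality → Spec_validate_formality_match items target_formality (validate_formality_match items target_formality)

-- ===== LEMMAS AND PROOFS =====

-- boolean shape of A's if-chain of early returns
theorem if_chain_bool (a b c r : Bool) :
    (if a then false else if b then false else if c then false else r) = (!(a || b || c) && r) := by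
  cases a <;> cases b <;> cases c <;> simp

-- the per-item "A rejects this category" test, as one boolean
def badA (rules : FormalityRule) (c : String) : Bool :=
  (get_category_type c == "top" && !(rules.allowed_tops.contains c)) ||
  (get_category_type c == "bottom" && !(rules.allowed_bottoms.contains c)) ||
  (get_category_type c == "shoes" && !(rules.allowed_shoes.contains c))

-- A's loop is an all-scan of the per-item test
theorem validateLoopA_eq_all (rules : FormalityRule) (items : List (List (String × String))) :
    validateLoopA rules items =
      items.all (fun item => !(badA rules ((PySem.Dict.mk item).getD "category" ""))) := by
  induction items with
  | nil => rfl
  | cons item rest ih =>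
    simp only [validateLoopA, List.all_cons, ← ih]
    rw [if_chain_bool]
    rfl

-- the three rule records and the three computed forbidden sets, as literals
def rF : FormalityRule := ⟨["shirt"], ["trousers"], ["shoes"], ["graphic"],
  "Formal contexts require traditional business attire"⟩
def rSC : FormalityRule := ⟨["shirt", "polo", "sweater"], ["trousers", "jeans"], ["shoes"], ["graphic"],
  "Business casual allows more flexibility but still polished"⟩
def rC : FormalityRule := ⟨["shirt", "t-shirt", "polo", "hoodie", "sweater"],
  ["trousers", "jeans", "joggers", "shorts"], ["shoes"], [], "Casual allows all categories"⟩
def fF : PySem.Set String := ["t-shirt", "polo", "hoodie", "sweater", "jacket", "jeans", "joggers", "shorts"]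
def fSC : PySem.Set String := ["t-shirt", "hoodie", "jacket", "joggers", "shorts"]
def fC : PySem.Set String := ["jacket"]

theorem RULES_mk : FORMALITY_RULES = PySem.Dict.mk [("formal", rF), ("smart_casual", rSC), ("casual", rC)] := by
  decide

theorem FORB_mk : FORBIDDEN = PySem.Dict.mk [("formal", fF), ("smart_casual", fSC), ("casual", fC)] := by
  decide

-- strings that occur in any category list
def allCats : List String := TOP_CATEGORIES ++ BOTTOM_CATEGORIES ++ SHOE_CATEGORIES

-- per-item agreement, one lemma per formality level
theorem badA_eq_F (c : String) : badA rF c = PySem.Set.contains fF c := by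
  by_cases hc : c ∈ allCats
  · simp only [allCats, TOP_CATEGORIES, BOTTOM_CATEGORIES, SHOE_CATEGORIES, List.append_assoc,
      List.mem_append, List.mem_cons, List.not_mem_nil, or_false] at hc
    rcases hc with ((rfl|rfl|rfl|rfl|rfl|rfl)|(rfl|rfl|rfl|rfl)|rfl) <;> decide
  · simp only [allCats, TOP_CATEGORIES, BOTTOM_CATEGORIES, SHOE_CATEGORIES, List.append_assoc,
      List.mem_append, List.mem_cons, List.not_mem_nil, or_false, not_or] at hc
    simp [badA, get_category_type, fF, rF, PySem.Set.contains, TOP_CATEGORIES, BOTTOM_CATEGORIES,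
      SHOE_CATEGORIES, hc]
theorem badA_eq_SC (c : String) : badA rSC c = PySem.Set.contains fSC c := by
  by_cases hc : c ∈ allCats
  · simp only [allCats, TOP_CATEGORIES, BOTTOM_CATEGORIES, SHOE_CATEGORIES, List.append_assoc,
      List.mem_append, List.mem_cons, List.not_mem_nil, or_false] at hc
    rcases hc with ((rfl|rfl|rfl|rfl|rfl|rfl)|(rfl|rfl|rfl|rfl)|rfl) <;> decide
  · simp only [allCats, TOP_CATEGORIES, BOTTOM_CATEGORIES, SHOE_CATEGORIES, List.append_assoc,
      List.mem_append, List.mem_cons, List.not_mem_nil, or_false, not_or] at hc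
    simp [badA, get_category_type, fSC, rSC, PySem.Set.contains, TOP_CATEGORIES, BOTTOM_CATEGORIES,
      SHOE_CATEGORIES, hc]
theorem badA_eq_C (c : String) : badA rC c = PySem.Set.contains fC c := by
  by_cases hc : c ∈ allCats
  · simp only [allCats, TOP_CATEGORIES, BOTTOM_CATEGORIES, SHOE_CATEGORIES, List.append_assoc,
      List.mem_append, List.mem_cons, List.not_mem_nil, or_false] at hc
    rcases hc with ((rfl|rfl|rfl|rfl|rfl|rfl)|(rfl|rfl|rfl|rfl)|rfl) <;> decide
  · simp only [allCats, TOP_CATEGORIES, BOTTOM_CATEGORIES, SHOE_CATEGORIES, List.append_assoc,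
      List.mem_append, List.mem_cons, List.not_mem_nil, or_false, not_or] at hc
    simp [badA, get_category_type, fC, rC, PySem.Set.contains, TOP_CATEGORIES, BOTTOM_CATEGORIES,
      SHOE_CATEGORIES, hc]

-- assemble one formality level
theorem level_eq (rules : FormalityRule) (fb : PySem.Set String)
    (hbad : ∀ c, badA rules c = PySem.Set.contains fb c) (items : List (List (String × String))) :
    validateLoopA rules items =
      items.all (fun item => !(PySem.Set.contains fb ((PySem.Dict.mk item).getD "category" ""))) := by
  rw [validateLoopA_eq_all]
  simp only [hbad]

-- ===== VERDICT (by name: the statement is the Claim_ definition above) =====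
theorem validate_formality_match_spec : Claim_equal_validate_formality_match := by
  intro items target_formality _
  unfold Spec_validate_formality_match
  match target_formality with
  | none => rfl
  | some tf =>
    by_cases he : tf = ""
    · subst he; rfl
    · by_cases h1 : tf = "formal"
      · subst h1
        show validate_formality_match items (some "formal") = validate_formality_match_alt items (some "formal")
        have hA : validate_formality_match items (some "formal") = validateLoopA rF items := by
          unfold validate_formality_match
          rw [RULES_mk]
          simp [PySem.Dict.get?_mk_cons]
        have hB : validate_formality_match_alt items (some "formal") =
            items.all (fun item => !(PySem.Set.contains fF ((PySem.Dict.mk item).getD "category" ""))) := by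
          unfold validate_formality_match_alt
          rw [FORB_mk]
          simp [PySem.Dict.contains_mk, PySem.Dict.getD_eq_get?_getD, PySem.Dict.get?_mk_cons,
            PySem.Set.contains]
        rw [hA, hB, level_eq rF fF badA_eq_F]
      · by_cases h2 : tf = "smart_casual"
        · subst h2
          have hA : validate_formality_match items (some "smart_casual") = validateLoopA rSC items := by
            unfold validate_formality_match
            rw [RULES_mk]
            simp [PySem.Dict.get?_mk_cons]
          have hB : validate_formality_match_alt items (some "smart_casual") =
              items.all (fun item => !(PySem.Set.contains fSC ((PySem.Dict.mk item).getD "category" ""))) := by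
            unfold validate_formality_match_alt
            rw [FORB_mk]
            simp [PySem.Dict.contains_mk, PySem.Dict.getD_eq_get?_getD, PySem.Dict.get?_mk_cons,
              PySem.Set.contains]
          rw [hA, hB, level_eq rSC fSC badA_eq_SC]
        · by_cases h3 : tf = "casual"
          · subst h3
            have hA : validate_formality_match items (some "casual") = validateLoopA rC items := by
              unfold validate_formality_match
              rw [RULES_mk]
              simp [PySem.Dict.get?_mk_cons]
            have hB : validate_formality_match_alt items (some "casual") =
                items.all (fun item => !(PySem.Set.contains fC ((PySem.Dict.mk item).getD "category" ""))) := by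
              unfold validate_formality_match_alt
              rw [FORB_mk]
              simp [PySem.Dict.contains_mk, PySem.Dict.getD_eq_get?_getD, PySem.Dict.get?_mk_cons,
                PySem.Set.contains]
            rw [hA, hB, level_eq rC fC badA_eq_C]
          · -- an unknown formality level: both return True
            have e1 : ("formal" == tf) = false := by
              simp only [beq_eq_false_iff_ne, ne_eq]; exact fun e => h1 e.symm
            have e2 : ("smart_casual" == tf) = false := by
              simp only [beq_eq_false_iff_ne, ne_eq]; exact fun e => h2 e.symm
            have e3 : ("casual" == tf) = false := by
              simp only [beq_eq_false_iff_ne, ne_eq]; exact fun e => h3 e.symm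
            have hA : validate_formality_match items (some tf) = true := by
              unfold validate_formality_match
              rw [RULES_mk]
              simp [e1, e2, e3, PySem.Dict.get?, he]
            have hB : validate_formality_match_alt items (some tf) = true := by
              unfold validate_formality_match_alt
              rw [FORB_mk]
              simp [PySem.Dict.contains_mk, e1, e2, e3]
            rw [hA, hB]
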